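-- pv_equiv track=rewrite | github.com/Leepilung/TIL | 문제풀이/Programmers/탐욕법(Greedy)/체육복.py | solution
-- ===== SOURCE A (Python) =====
-- def solution(n, lost, reserve):
--     answer = 0
--     lost.sort()
--     reserve.sort()
--     lo_copy = lost.copy()
--     re_copy = reserve.copy()
--     # n 전체학생수 // lost 도난당한 학생들의 번호  // reserve 여벌옷이 있는 학생들
--     for i in lo_copy:
--         if i in re_copy:
--             reserve.remove(i)
--             lost.remove(i)
--         else:
--             continue
--
--     for i in lost:
--         if i-1 in reserve:
--             reserve.remove(i-1)
--             answer += 1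
--         elif i+1 in reserve:
--             reserve.remove(i+1)
--             answer += 1
--
--     return n - len(lost) + answer
-- ===== SOURCE B (Python) =====
-- def solution(n, lost, reserve):
--     # merge-based: sort both lists, cancel exact matches with one two-pointer
--     # merge, then match remaining lost to +-1 spares with a second two-pointer
--     # sweep; no membership tests or removals.  A sorts its arguments in place,
--     # B does not: the equivalence is about the return value.
--     lo = sorted(lost)
--     re = sorted(reserve)
--     L = []
--     R = []
--     i = j = 0
--     while i < len(lo) and j < len(re):
--         if lo[i] == re[j]:
--             i += 1
--             j += 1
--         elif lo[i] < re[j]: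
--             L.append(lo[i])
--             i += 1
--         else:
--             R.append(re[j])
--             j += 1
--     L.extend(lo[i:])
--     R.extend(re[j:])
--     cnt = 0
--     i = j = 0
--     while i < len(L) and j < len(R):
--         if R[j] < L[i] - 1:
--             j += 1
--         elif R[j] > L[i] + 1:
--             i += 1
--         else:
--             cnt += 1
--             i += 1
--             j += 1
--     return n - len(L) + cnt
-- ===== Notes on version B (the rewrite author's own statement) =====
-- stated objective: alternative
-- what changed: B replaces A's membership-test-and-remove greedy by two two-pointer merge sweeps over the sorted lists: one merge cancels exact matches, a second merge matches each remaining lost student to a +-1 spare, so no inner list scan or list.remove remains.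
import Mathlib
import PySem

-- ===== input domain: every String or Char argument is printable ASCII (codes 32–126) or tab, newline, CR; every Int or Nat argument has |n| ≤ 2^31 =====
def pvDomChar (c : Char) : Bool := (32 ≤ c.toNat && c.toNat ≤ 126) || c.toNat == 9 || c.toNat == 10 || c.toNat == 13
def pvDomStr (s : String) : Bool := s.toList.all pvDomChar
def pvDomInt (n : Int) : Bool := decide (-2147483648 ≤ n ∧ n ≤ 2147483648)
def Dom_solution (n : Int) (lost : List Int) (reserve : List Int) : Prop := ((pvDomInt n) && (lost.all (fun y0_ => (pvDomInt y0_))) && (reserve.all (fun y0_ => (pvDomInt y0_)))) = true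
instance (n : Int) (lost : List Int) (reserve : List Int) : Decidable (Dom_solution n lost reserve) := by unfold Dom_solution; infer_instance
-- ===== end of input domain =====

-- B replaces A's membership-test-and-remove greedy by two two-pointer merge sweeps over the
-- sorted lists (objective: alternative); A sorts/mutates its list arguments in place,
-- B does not — the equivalence proved is about the return value.

-- ===== PORT A =====
-- loop 1: for i in lo_copy: if i in re_copy: reserve.remove(i); lost.remove(i)
-- (.getD keeps the port total; the raising case — removal of an absent element, ValueError —
--  is exactly what Pre_solution excludes)
def pvALoop1Step (reCopy : List Int) (st : List Int × List Int) (i : Int) : List Int × List Int :=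
  if i ∈ reCopy then
    ((PySem.List.remove? st.1 i).getD st.1, (PySem.List.remove? st.2 i).getD st.2)
  else st

-- loop 2: for i in lost: if i-1 in reserve: …; elif i+1 in reserve: …
def pvALoop2Step (st : Int × List Int) (i : Int) : Int × List Int :=
  if (i - 1) ∈ st.2 then (st.1 + 1, (PySem.List.remove? st.2 (i - 1)).getD st.2)
  else if (i + 1) ∈ st.2 then (st.1 + 1, (PySem.List.remove? st.2 (i + 1)).getD st.2)
  else st

def solution (n : Int) (lost : List Int) (reserve : List Int) : Int :=
  let lost1 := PySem.List.sorted lost (fun x => x) false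
  let reserve1 := PySem.List.sorted reserve (fun x => x) false
  let loCopy := lost1
  let reCopy := reserve1
  let st1 := loCopy.foldl (pvALoop1Step reCopy) (lost1, reserve1)
  let st2 := st1.1.foldl pvALoop2Step (0, st1.2)
  n - (st1.1.length : Int) + st2.1

-- ===== PORT B =====
-- first while loop of Source B: two-pointer merge of the sorted lists cancelling exact matches,
-- collecting the unmatched lost values (L) and the unconsumed reserve values (R); the loop
-- is transliterated as fuel-bounded structural recursion on the two suffixes (each
-- iteration consumes one element, so fuel = total length; the base cases are the trailing
-- L.extend(lo[i:]) / R.extend(re[j:]))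
def pvCancel : Nat → List Int → List Int → List Int × List Int
  | _, [], re => ([], re)
  | _, a :: lo, [] => (a :: lo, [])
  | 0, lo, re => (lo, re)
  | f + 1, a :: lo, b :: re =>
    if a = b then pvCancel f lo re
    else if a < b then
      let p := pvCancel f lo (b :: re); (a :: p.1, p.2)
    else
      let p := pvCancel f (a :: lo) re; (p.1, b :: p.2)

-- second while loop of Source B: two-pointer sweep matching each lost value to a ±1 spare
def pvMatch : Nat → List Int → List Int → Int
  | _, [], _ => 0
  | _, _ :: _, [] => 0
  | 0, _, _ => 0
  | f + 1, a :: L, b :: R =>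
    if b < a - 1 then pvMatch f (a :: L) R
    else if b > a + 1 then pvMatch f L (b :: R)
    else 1 + pvMatch f L R

def solution_alt (n : Int) (lost : List Int) (reserve : List Int) : Int :=
  let lo := PySem.List.sorted lost (fun x => x) false
  let re := PySem.List.sorted reserve (fun x => x) false
  let p := pvCancel (lo.length + re.length) lo re
  n - (p.1.length : Int) + pvMatch (p.1.length + p.2.length) p.1 p.2

-- ===== PRECONDITION & SPEC =====
-- Pre_ is exactly A's domain: A raises ValueError iff some value occurs in both lists but
-- more often in lost than in reserve (the second removal of an exhausted value fails).
def Pre_solution (n : Int) (lost : List Int) (reserve : List Int) : Prop :=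
  ∀ v ∈ lost, v ∈ reserve → lost.count v ≤ reserve.count v
instance (n : Int) (lost : List Int) (reserve : List Int) : Decidable (Pre_solution n lost reserve) := by unfold Pre_solution; infer_instance
def pvWitness_solution : Int × List Int × List Int := (5, ([2, 4], [1, 3, 5]))

def Spec_solution (n : Int) (lost : List Int) (reserve : List Int) (out : Int) : Prop := out = solution_alt n lost reserve
instance (n : Int) (lost : List Int) (reserve : List Int) (out : Int) : Decidable (Spec_solution n lost reserve out) := by unfold Spec_solution; infer_instance

-- ===== CLAIM (what is proved, stated in full; the proofs are below) =====
def Claim_equal_solution : Prop := ∀ (n : Int) (lost : List Int) (reserve : List Int), Dom_solution n lost reserve → Pre_solution n lost reserve → Spec_solution n lost reserve (solution n lost reserve)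
-- ===== LEMMAS AND PROOFS =====

-- python's list.remove, made total by .getD, is List.erase (erasing an absent value is a no-op)
theorem pv_removeD_eq_erase (s : List Int) (x : Int) :
    (PySem.List.remove? s x).getD s = s.erase x := by
  by_cases hx : x ∈ s
  · rw [PySem.List.remove?_eq_some_erase s x hx]; rfl
  · rw [(PySem.List.remove?_eq_none_iff s x).mpr hx]
    simp [List.erase_of_not_mem hx]

theorem pv_step1_erase (C : List Int) (l r : List Int) (i : Int) :
    pvALoop1Step C (l, r) i = if i ∈ C then (l.erase i, r.erase i) else (l, r) := by
  simp [pvALoop1Step, pv_removeD_eq_erase]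

theorem pv_step2_erase (acc : Int) (r : List Int) (i : Int) :
    pvALoop2Step (acc, r) i =
      if (i - 1) ∈ r then (acc + 1, r.erase (i - 1))
      else if (i + 1) ∈ r then (acc + 1, r.erase (i + 1))
      else (acc, r) := by
  simp [pvALoop2Step, pv_removeD_eq_erase]

-- the paired fold of A's first loop acts on each component independently
theorem pv_loop1A (C : List Int) : ∀ (xs l r : List Int),
    xs.foldl (pvALoop1Step C) (l, r) =
      (xs.foldl (fun acc i => if i ∈ C then acc.erase i else acc) l,
       xs.foldl (fun acc i => if i ∈ C then acc.erase i else acc) r) := by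
  intro xs
  induction xs with
  | nil => intro l r; simp
  | cons i t ih =>
    intro l r
    simp only [List.foldl_cons, pv_step1_erase]
    by_cases hiC : i ∈ C <;> simp [hiC, ih]

-- erasing, once per occurrence of each C-value of xs, every C-value of l is a filter
theorem pv_fold_erase_filter (C : List Int) : ∀ (xs l : List Int),
    (∀ v ∈ C, l.count v ≤ xs.count v) →
    xs.foldl (fun acc i => if i ∈ C then acc.erase i else acc) l
      = l.filter (fun v => !decide (v ∈ C)) := by
  intro xs
  induction xs with
  | nil =>
    intro l h
    simp only [List.foldl_nil]
    symm
    apply List.filter_eq_self.mpr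
    intro a ha
    have hnC : a ∉ C := by
      intro haC
      have h0 := h a haC
      simp only [List.count_nil, Nat.le_zero, List.count_eq_zero] at h0
      exact h0 ha
    simp [hnC]
  | cons i t ih =>
    intro l h
    simp only [List.foldl_cons]
    by_cases hiC : i ∈ C
    · simp only [if_pos hiC]
      have hcond : ∀ v ∈ C, (l.erase i).count v ≤ t.count v := by
        intro v hv
        have hl := h v hv
        by_cases hvi : v = i
        · subst hvi
          rw [List.count_erase_self]
          rw [List.count_cons_self] at hl
          omega
        · rw [List.count_erase_of_ne hvi]
          rw [List.count_cons_of_ne (Ne.symm hvi)] at hl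
          exact hl
      rw [ih _ hcond]
      have hpi : (fun v => !decide (v ∈ C)) i = false := by simp [hiC]
      clear h hcond ih
      induction l with
      | nil => simp
      | cons a l ihl =>
        by_cases hai : a = i
        · subst hai
          rw [List.erase_cons_head]
          simp [hpi]
        · rw [List.erase_cons_tail (by simpa using hai)]
          simp only [List.filter_cons, ihl]
    · simp only [if_neg hiC]
      apply ih
      intro v hv
      have := h v hv
      have hiv : i ≠ v := by rintro rfl; exact hiC hv
      rw [List.count_cons_of_ne hiv] at this
      exact this

-- count of the reserve list after A's first loop
theorem pv_fold_erase_count (C : List Int) : ∀ (xs r : List Int),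
    (∀ v ∈ C, xs.count v ≤ r.count v) → ∀ v : Int,
    (xs.foldl (fun acc i => if i ∈ C then acc.erase i else acc) r).count v
      = r.count v - (if v ∈ C then xs.count v else 0) := by
  intro xs
  induction xs with
  | nil => intro r _ v; simp
  | cons i t ih =>
    intro r h v
    simp only [List.foldl_cons]
    by_cases hiC : i ∈ C
    · have hir : 1 ≤ r.count i := le_trans (by simp) (h i hiC)
      simp only [if_pos hiC]
      have hcond : ∀ w ∈ C, t.count w ≤ (r.erase i).count w := by
        intro w hw
        have hr := h w hw
        by_cases hwi : w = i
        · subst hwi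
          rw [List.count_erase_self]
          rw [List.count_cons_self] at hr
          omega
        · rw [List.count_erase_of_ne hwi]
          rw [List.count_cons_of_ne (Ne.symm hwi)] at hr
          exact hr
      rw [ih _ hcond v]
      by_cases hvC : v ∈ C
      · simp only [if_pos hvC]
        by_cases hvi : v = i
        · subst hvi
          rw [List.count_erase_self, List.count_cons_self]
          omega
        · rw [List.count_erase_of_ne hvi, List.count_cons_of_ne (Ne.symm hvi)]
      · simp only [if_neg hvC]
        have hvi : v ≠ i := fun hvi => hvC (hvi ▸ hiC)
        rw [List.count_erase_of_ne hvi]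
    · simp only [if_neg hiC]
      have hcond : ∀ w ∈ C, t.count w ≤ r.count w := by
        intro w hw
        have hiw : i ≠ w := by rintro rfl; exact hiC hw
        have := h w hw
        rw [List.count_cons_of_ne hiw] at this
        exact this
      rw [ih _ hcond v]
      by_cases hvC : v ∈ C
      · have hiv : i ≠ v := by rintro rfl; exact hiC hvC
        simp [hvC, List.count_cons_of_ne hiv]
      · simp [hvC]

-- the one-step unfolding of B's cancel merge on two nonempty lists
theorem pvCancel_cons (f : Nat) (a b : Int) (lo re : List Int) :
    pvCancel (f + 1) (a :: lo) (b :: re) =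
      if a = b then pvCancel f lo re
      else if a < b then (a :: (pvCancel f lo (b :: re)).1, (pvCancel f lo (b :: re)).2)
      else ((pvCancel f (a :: lo) re).1, b :: (pvCancel f (a :: lo) re).2) := by
  simp [pvCancel]

-- the one-step unfolding of B's matching sweep on two nonempty lists
theorem pvMatch_cons (f : Nat) (a b : Int) (L R : List Int) :
    pvMatch (f + 1) (a :: L) (b :: R) =
      if b < a - 1 then pvMatch f (a :: L) R
      else if b > a + 1 then pvMatch f L (b :: R)
      else 1 + pvMatch f L R := by
  simp [pvMatch]

-- B's cancel merge keeps its reserve output a subsequence of the reserve input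
theorem pvCancel_sublist : ∀ (f : Nat) (lo re : List Int),
    lo.length + re.length ≤ f → (pvCancel f lo re).2.Sublist re := by
  intro f
  induction f with
  | zero =>
    intro lo re h
    cases lo with
    | nil => simp [pvCancel]
    | cons a lo =>
      cases re with
      | nil => simp [pvCancel]
      | cons b re => simp at h
  | succ f ih =>
    intro lo re h
    cases lo with
    | nil => simp [pvCancel]
    | cons a lo =>
      cases re with
      | nil => simp [pvCancel]
      | cons b re =>
        simp only [List.length_cons] at h
        rw [pvCancel_cons]
        by_cases hab : a = b
        · rw [if_pos hab]
          exact (ih lo re (by omega)).trans (List.sublist_cons_self b re)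
        · rw [if_neg hab]
          by_cases hlt : a < b
          · rw [if_pos hlt]
            exact ih lo (b :: re) (by simp only [List.length_cons]; omega)
          · rw [if_neg hlt]
            exact (ih (a :: lo) re (by simp only [List.length_cons]; omega)).cons₂ b

-- what B's cancel merge computes on sorted inputs inside Pre_:
-- its lost output is A's filtered lost list, its reserve output has A's reserve counts
theorem pvCancel_spec : ∀ (f : Nat) (lo re : List Int),
    lo.length + re.length ≤ f →
    lo.Pairwise (· ≤ ·) → re.Pairwise (· ≤ ·) →
    (∀ v ∈ re, lo.count v ≤ re.count v) →
    (pvCancel f lo re).1 = lo.filter (fun v => !decide (v ∈ re)) ∧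
    (∀ v : Int, (pvCancel f lo re).2.count v = re.count v - lo.count v) := by
  intro f
  induction f with
  | zero =>
    intro lo re h
    cases lo with
    | nil =>
      intro _ _ _
      constructor
      · simp [pvCancel]
      · intro v; simp [pvCancel]
    | cons a lo =>
      cases re with
      | nil =>
        intro _ _ _
        constructor
        · simp [pvCancel]
        · intro v; simp [pvCancel]
      | cons b re => simp at h
  | succ f ih =>
    intro lo re h
    cases lo with
    | nil =>
      intro _ _ _
      constructor
      · simp [pvCancel]
      · intro v; simp [pvCancel]
    | cons a lo =>
      cases re with
      | nil =>
        intro _ _ _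
        constructor
        · simp [pvCancel]
        · intro v; simp [pvCancel]
      | cons b re =>
        simp only [List.length_cons] at h
        intro hlo hre hcnts
        rw [pvCancel_cons]
        by_cases hab : a = b
        · subst hab
          rw [if_pos rfl]
          have hcnt : ∀ v ∈ re, lo.count v ≤ re.count v := by
            intro v hv
            have hh := hcnts v (List.mem_cons_of_mem a hv)
            by_cases hva : v = a
            · subst hva
              rw [List.count_cons_self, List.count_cons_self] at hh
              omega
            · rwa [List.count_cons_of_ne (fun he => hva he.symm),
                  List.count_cons_of_ne (fun he => hva he.symm)] at hh
          obtain ⟨ih1, ih2⟩ := ih lo re (by omega) hlo.tail hre.tail hcnt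
          have hmem_a : a ∈ lo → a ∈ re := by
            intro hb
            have hh := hcnts a List.mem_cons_self
            rw [List.count_cons_self, List.count_cons_self] at hh
            have hpos := List.count_pos_iff.mpr hb
            exact List.count_pos_iff.mp (by omega)
          constructor
          · rw [ih1]
            rw [show List.filter (fun v => !decide (v ∈ a :: re)) (a :: lo)
                  = List.filter (fun v => !decide (v ∈ a :: re)) lo from by
                rw [List.filter_cons]; simp]
            apply List.filter_congr
            intro v hv
            by_cases hva : v = a
            · subst hva
              simp [hmem_a hv]
            · simp [List.mem_cons, hva]
          · intro v
            rw [ih2 v]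
            by_cases hva : v = a
            · subst hva
              rw [List.count_cons_self, List.count_cons_self]
              omega
            · rw [List.count_cons_of_ne (fun he => hva he.symm),
                  List.count_cons_of_ne (fun he => hva he.symm)]
        · rw [if_neg hab]
          by_cases hlt : a < b
          · rw [if_pos hlt]
            have hble : ∀ x ∈ b :: re, b ≤ x := by
              intro x hx
              rcases List.mem_cons.mp hx with rfl | hx
              · exact le_refl x
              · exact List.rel_of_pairwise_cons hre hx
            have hanotin : a ∉ b :: re := by
              intro hmem
              have := hble a hmem
              omega
            have hcnt : ∀ v ∈ b :: re, lo.count v ≤ (b :: re).count v := by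
              intro v hv
              exact le_trans (by rw [List.count_cons]; omega) (hcnts v hv)
            obtain ⟨ih1, ih2⟩ := ih lo (b :: re)
              (by simp only [List.length_cons]; omega) hlo.tail hre hcnt
            constructor
            · have hfa : (!decide (a ∈ b :: re)) = true := by simp [hanotin]
              rw [ih1, List.filter_cons, if_pos hfa]
            · intro v
              rw [ih2 v]
              by_cases hva : v = a
              · subst hva
                rw [List.count_eq_zero.mpr hanotin, List.count_cons_self]
                omega
              · rw [List.count_cons_of_ne (fun he => hva he.symm)]
          · rw [if_neg hlt]
            have hba : b < a := by omega
            have hale : ∀ x ∈ a :: lo, a ≤ x := by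
              intro x hx
              rcases List.mem_cons.mp hx with rfl | hx
              · exact le_refl x
              · exact List.rel_of_pairwise_cons hlo hx
            have hbnotin : b ∉ a :: lo := by
              intro hmem
              have := hale b hmem
              omega
            have hcnt : ∀ v ∈ re, (a :: lo).count v ≤ re.count v := by
              intro v hv
              have hh := hcnts v (List.mem_cons_of_mem b hv)
              by_cases hvb : v = b
              · subst hvb
                rw [List.count_eq_zero.mpr hbnotin]
                exact Nat.zero_le _
              · rwa [List.count_cons_of_ne (fun he => hvb he.symm)] at hh
            obtain ⟨ih1, ih2⟩ := ih (a :: lo) re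
              (by simp only [List.length_cons]; omega) hlo hre.tail hcnt
            constructor
            · rw [ih1]
              apply List.filter_congr
              intro v hv
              have hvb : v ≠ b := by
                have := hale v hv
                omega
              simp [List.mem_cons, hvb]
            · intro v
              by_cases hvb : v = b
              · subst hvb
                rw [List.count_cons_self, List.count_cons_self, ih2 v,
                    List.count_eq_zero.mpr hbnotin]
                omega
              · rw [List.count_cons_of_ne (fun he => hvb he.symm),
                    List.count_cons_of_ne (fun he => hvb he.symm), ih2 v]

-- A's second loop with an empty reserve list does nothing
theorem pv_greedy_nil : ∀ (L : List Int) (acc : Int),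
    (L.foldl pvALoop2Step (acc, [])).1 = acc := by
  intro L
  induction L with
  | nil => intro acc; simp
  | cons i t ih =>
    intro acc
    simp only [List.foldl_cons, pv_step2_erase]
    simp [ih]

-- A's second loop depends on its reserve list only through its multiset
theorem pv_greedy_perm : ∀ (L : List Int) (acc : Int) (r r' : List Int), r.Perm r' →
    (L.foldl pvALoop2Step (acc, r)).1 = (L.foldl pvALoop2Step (acc, r')).1 := by
  intro L
  induction L with
  | nil => intro acc r r' _; simp
  | cons i t ih =>
    intro acc r r' hp
    simp only [List.foldl_cons, pv_step2_erase]
    by_cases h1 : (i - 1) ∈ r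
    · rw [if_pos h1, if_pos (hp.mem_iff.mp h1)]
      exact ih _ _ _ (hp.erase (i - 1))
    · rw [if_neg h1, if_neg (fun h => h1 (hp.mem_iff.mpr h))]
      by_cases h2 : (i + 1) ∈ r
      · rw [if_pos h2, if_pos (hp.mem_iff.mp h2)]
        exact ih _ _ _ (hp.erase (i + 1))
      · rw [if_neg h2, if_neg (fun h => h2 (hp.mem_iff.mpr h))]
        exact ih _ _ _ hp

-- a reserve value adjacent to no lost value can be dropped from A's second loop
theorem pv_greedy_skip : ∀ (L : List Int) (acc b : Int) (r : List Int),
    (∀ i ∈ L, i - 1 ≠ b ∧ i + 1 ≠ b) →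
    (L.foldl pvALoop2Step (acc, b :: r)).1 = (L.foldl pvALoop2Step (acc, r)).1 := by
  intro L
  induction L with
  | nil => intro acc b r _; simp
  | cons i t ih =>
    intro acc b r h
    obtain ⟨hi1, hi2⟩ := h i List.mem_cons_self
    have ht : ∀ j ∈ t, j - 1 ≠ b ∧ j + 1 ≠ b := fun j hj => h j (List.mem_cons_of_mem i hj)
    simp only [List.foldl_cons, pv_step2_erase]
    have hm1 : ((i - 1) ∈ b :: r) ↔ ((i - 1) ∈ r) := by
      simp [List.mem_cons, hi1]
    have hm2 : ((i + 1) ∈ b :: r) ↔ ((i + 1) ∈ r) := by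
      simp [List.mem_cons, hi2]
    have he1 : (b :: r).erase (i - 1) = b :: r.erase (i - 1) :=
      List.erase_cons_tail (by simpa using fun h => hi1 h.symm)
    have he2 : (b :: r).erase (i + 1) = b :: r.erase (i + 1) :=
      List.erase_cons_tail (by simpa using fun h => hi2 h.symm)
    by_cases h1 : (i - 1) ∈ r
    · rw [if_pos (hm1.mpr h1), if_pos h1, he1]
      exact ih _ _ _ ht
    · rw [if_neg (fun h => h1 (hm1.mp h)), if_neg h1]
      by_cases h2 : (i + 1) ∈ r
      · rw [if_pos (hm2.mpr h2), if_pos h2, he2]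
        exact ih _ _ _ ht
      · rw [if_neg (fun h => h2 (hm2.mp h)), if_neg h2]
        exact ih _ _ _ ht

-- the heart of the equivalence: on sorted, value-disjoint lists, B's two-pointer
-- sweep computes exactly the number of matches of A's remove-based greedy loop
theorem pv_match_eq : ∀ (f : Nat) (L R : List Int) (acc : Int),
    L.length + R.length ≤ f →
    L.Pairwise (· ≤ ·) → R.Pairwise (· ≤ ·) → (∀ v ∈ L, v ∉ R) →
    (L.foldl pvALoop2Step (acc, R)).1 = acc + pvMatch f L R := by
  intro f
  induction f with
  | zero =>
    intro L R acc h
    cases L with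
    | nil => intro _ _ _; simp [pvMatch]
    | cons a L =>
      cases R with
      | nil => intro _ _ _; rw [pv_greedy_nil]; simp [pvMatch]
      | cons b R => simp at h
  | succ f ih =>
    intro L' R' acc h
    cases L' with
    | nil => intro _ _ _; simp [pvMatch]
    | cons a L =>
      cases R' with
      | nil => intro _ _ _; rw [pv_greedy_nil]; simp [pvMatch]
      | cons b R =>
        simp only [List.length_cons] at h
        intro hL hR hd
        rw [pvMatch_cons]
        by_cases hb : b < a - 1
        · rw [if_pos hb]
          have hale : ∀ i ∈ a :: L, a ≤ i := by
            intro i hi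
            rcases List.mem_cons.mp hi with rfl | hi
            · exact le_refl i
            · exact List.rel_of_pairwise_cons hL hi
          have hskip : ∀ i ∈ a :: L, i - 1 ≠ b ∧ i + 1 ≠ b := by
            intro i hi
            have := hale i hi
            omega
          rw [pv_greedy_skip _ _ _ _ hskip]
          exact ih (a :: L) R acc (by simp only [List.length_cons]; omega)
            hL hR.tail (fun v hv hvr => hd v hv (List.mem_cons_of_mem b hvr))
        · rw [if_neg hb]
          have hble : ∀ x ∈ b :: R, b ≤ x := by
            intro x hx
            rcases List.mem_cons.mp hx with rfl | hx
            · exact le_refl x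
            · exact List.rel_of_pairwise_cons hR hx
          by_cases hb2 : b > a + 1
          · rw [if_pos hb2]
            have h1 : (a - 1) ∉ b :: R := by
              intro hmem
              have := hble _ hmem
              omega
            have h2 : (a + 1) ∉ b :: R := by
              intro hmem
              have := hble _ hmem
              omega
            simp only [List.foldl_cons, pv_step2_erase, if_neg h1, if_neg h2]
            exact ih L (b :: R) acc (by simp only [List.length_cons]; omega)
              hL.tail hR (fun v hv => hd v (List.mem_cons_of_mem a hv))
          · rw [if_neg hb2]
            have hanot : a ∉ b :: R := hd a List.mem_cons_self
            have hab : b ≠ a := fun h' => hanot (h' ▸ List.mem_cons_self)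
            have htail : ∀ v ∈ L, v ∉ R :=
              fun v hv hvr => hd v (List.mem_cons_of_mem a hv) (List.mem_cons_of_mem b hvr)
            have hfl : L.length + R.length ≤ f := by omega
            have hcase : b = a - 1 ∨ b = a + 1 := by omega
            rcases hcase with rfl | rfl
            · have hm1 : (a - 1) ∈ (a - 1) :: R := List.mem_cons_self
              simp only [List.foldl_cons, pv_step2_erase, if_pos hm1, List.erase_cons_head]
              rw [ih L R (acc + 1) hfl hL.tail hR.tail htail]
              ring
            · have h1 : (a - 1) ∉ (a + 1) :: R := by
                intro hmem
                have := hble _ hmem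
                omega
              have hm2 : (a + 1) ∈ (a + 1) :: R := List.mem_cons_self
              simp only [List.foldl_cons, pv_step2_erase, if_neg h1, if_pos hm2,
                List.erase_cons_head]
              rw [ih L R (acc + 1) hfl hL.tail hR.tail htail]
              ring

-- ===== VERDICT (by name: the statement is the Claim_ definition above) =====
theorem solution_spec : Claim_equal_solution := by
  intro n lost reserve _ hpre
  unfold Spec_solution solution solution_alt
  dsimp only
  set Sl := PySem.List.sorted lost (fun x => x) false with hSldef
  set Sr := PySem.List.sorted reserve (fun x => x) false with hSrdef
  have hSlp : Sl.Pairwise (· ≤ ·) := by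
    have := PySem.List.sorted_pairwise (xs := lost) (key := fun x => x)
    simpa [hSldef] using this
  have hSrp : Sr.Pairwise (· ≤ ·) := by
    have := PySem.List.sorted_pairwise (xs := reserve) (key := fun x => x)
    simpa [hSrdef] using this
  have hcl : ∀ v : Int, Sl.count v = lost.count v :=
    fun v => (PySem.List.sorted_perm lost (fun x => x) false).count_eq v
  have hcr : ∀ v : Int, Sr.count v = reserve.count v :=
    fun v => (PySem.List.sorted_perm reserve (fun x => x) false).count_eq v
  have hmSr : ∀ v : Int, v ∈ Sr ↔ v ∈ reserve := fun v => PySem.List.mem_sorted ..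
  have hsafe : ∀ v ∈ Sr, Sl.count v ≤ Sr.count v := by
    intro v hv
    rw [hcl, hcr]
    by_cases hvl : v ∈ lost
    · exact hpre v hvl ((hmSr v).mp hv)
    · rw [List.count_eq_zero.mpr hvl]
      exact Nat.zero_le _
  -- A's first loop: remaining lost is a filter, remaining reserve has known counts
  rw [pv_loop1A Sr Sl Sl Sr,
      pv_fold_erase_filter Sr Sl Sl (fun v _ => Nat.le_refl _)]
  -- B's cancel merge computes the same filter and the same counts
  obtain ⟨hB1, hB2⟩ := pvCancel_spec (Sl.length + Sr.length) Sl Sr (Nat.le_refl _)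
    hSlp hSrp hsafe
  rw [hB1]
  -- the two remaining reserve multisets are equal, hence permutations of each other
  have hperm : (Sl.foldl (fun acc i => if i ∈ Sr then acc.erase i else acc) Sr).Perm
      (pvCancel (Sl.length + Sr.length) Sl Sr).2 := by
    apply List.perm_iff_count.mpr
    intro v
    rw [pv_fold_erase_count Sr Sl Sr hsafe v, hB2 v]
    by_cases hv : v ∈ Sr
    · simp [hv]
    · have : Sr.count v = 0 := List.count_eq_zero.mpr hv
      simp [hv, this]
  rw [pv_greedy_perm _ 0 _ _ hperm]
  -- the filtered lost list is sorted, B's reserve output is sorted, and they are disjoint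
  have hFp : (Sl.filter (fun v => !decide (v ∈ Sr))).Pairwise (· ≤ ·) := hSlp.filter _
  have hRp : (pvCancel (Sl.length + Sr.length) Sl Sr).2.Pairwise (· ≤ ·) :=
    List.Pairwise.sublist (pvCancel_sublist (Sl.length + Sr.length) Sl Sr (Nat.le_refl _)) hSrp
  have hdisj : ∀ v ∈ Sl.filter (fun v => !decide (v ∈ Sr)),
      v ∉ (pvCancel (Sl.length + Sr.length) Sl Sr).2 := by
    intro v hv hvr
    have hnot : v ∉ Sr := by
      have := (List.mem_filter.mp hv).2
      simpa using this
    have hcnt0 : (pvCancel (Sl.length + Sr.length) Sl Sr).2.count v = 0 := by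
      rw [hB2 v, List.count_eq_zero.mpr hnot]
      omega
    exact absurd (List.count_pos_iff.mpr hvr) (by omega)
  rw [pv_match_eq _ _ _ 0 (Nat.le_refl _) hFp hRp hdisj]
  dsimp only
  omega
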